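-- pv_equiv track=rewrite | github.com/HelloMinchan/problem-solving | programmers/괄호 변환/solution.py | dfs
-- ===== SOURCE A (Python) =====
-- def dfs(p):
--     temp_string = ""
--
--     if p == "":
--         return ""
--
--     stack = []
--     is_u_right = True
--     left = 0
--     right = 0
--
--     u_index = 0
--     while u_index < len(p):
--         if p[u_index] == "(":
--             left += 1
--             stack.append(p[u_index])
--
--             if left == right:
--                 u_index += 1
--                 break
--         else:
--             right += 1
--
--             if stack and stack[-1] == "(":
--                 stack.pop()
--             else:
--                 is_u_right = False
--
--             if left == right:
--                 u_index += 1
--                 break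
--
--         u_index += 1
--
--     if is_u_right:
--         temp_string += p[:u_index]
--
--         if u_index < len(p):
--             temp_string += dfs(p[u_index:])
--     else:
--         temp_string = "("
--
--         if u_index < len(p):
--             temp_string += dfs(p[u_index:])
--
--         temp_string += ")"
--
--         for u_p in p[:u_index][1 : u_index - 1]:
--             if u_p == "(":
--                 temp_string += ")"
--             else:
--                 temp_string += "("
--
--     return temp_string
-- ===== SOURCE B (Python) =====
-- def dfs(p):
--     # One left-to-right pass splits p into minimal zero-balance segments
--     # (any non-'(' counts as ')'), then one backwards fold assembles the result.
--     segs = []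
--     bal = 0
--     cur = []
--     ok = True
--     for c in p:
--         if c != "(" and bal == 0:
--             ok = False
--         bal += 1 if c == "(" else -1
--         cur.append(c)
--         if bal == 0:
--             segs.append(("".join(cur), ok))
--             cur = []
--             ok = True
--     if cur:
--         segs.append(("".join(cur), ok))
--     res = ""
--     for seg, good in reversed(segs):
--         if good:
--             res = seg + res
--         else:
--             res = "(" + res + ")" + "".join(")" if c == "(" else "(" for c in seg[1:-1])
--     return res
-- ===== Notes on version B (the rewrite author's own statement) =====
-- stated objective: faster
-- what changed: A recursively slices off the minimal balanced/unbalanced prefix and concatenates strings per recursive call; B makes one left-to-right pass splitting the input into its minimal zero-balance segments and then assembles the result in a single backwards fold over those segments, with no per-segment re-slicing of the suffix.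
import Mathlib
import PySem

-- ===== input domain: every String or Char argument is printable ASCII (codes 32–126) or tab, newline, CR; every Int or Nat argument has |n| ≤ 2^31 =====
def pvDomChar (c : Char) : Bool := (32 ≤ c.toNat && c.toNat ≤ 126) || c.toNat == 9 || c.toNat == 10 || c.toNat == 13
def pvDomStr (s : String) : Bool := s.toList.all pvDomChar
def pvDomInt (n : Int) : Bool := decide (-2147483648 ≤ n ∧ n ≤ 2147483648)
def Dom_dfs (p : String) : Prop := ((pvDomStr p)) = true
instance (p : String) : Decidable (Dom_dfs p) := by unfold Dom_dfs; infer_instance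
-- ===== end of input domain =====

-- B replaces A's slice-and-recurse on the suffix by one left-to-right split into
-- minimal zero-balance segments followed by one backwards fold (objective: faster, asymptotic).

-- ===== PORT A =====
-- A's while loop: state (stack, is_u_right, left, right, u_index), consuming p from index u_index.
def dfsScan : List Char → List Char → Bool → Int → Int → Nat → Nat × Bool
  | [], _stack, isR, _l, _r, u => (u, isR)
  | c :: rest, stack, isR, l, r, u =>
    if c = '(' then
      let l' := l + 1
      let stack' := stack ++ [c]
      if l' = r then (u + 1, isR)
      else dfsScan rest stack' isR l' r (u + 1)
    else
      let r' := r + 1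
      let sb : List Char × Bool :=
        if stack.getLast? = some '(' then (stack.dropLast, isR) else (stack, false)
      if l = r' then (u + 1, sb.2)
      else dfsScan rest sb.1 sb.2 l r' (u + 1)

-- termination helpers for dfsAux (cited by its decreasing_by)
theorem dfsScan_ge : ∀ (cs stack : List Char) (isR : Bool) (l r : Int) (u : Nat),
    u ≤ (dfsScan cs stack isR l r u).1 := by
  intro cs
  induction cs with
  | nil => intro stack isR l r u; simp [dfsScan]
  | cons c rest ih =>
    intro stack isR l r u
    simp only [dfsScan]
    split_ifs <;>
      first
        | exact Nat.le_succ u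
        | exact le_trans (Nat.le_succ u) (ih _ _ _ _ _)

theorem dfsScan_pos : ∀ (cs stack : List Char) (isR : Bool) (l r : Int) (u : Nat),
    cs ≠ [] → u < (dfsScan cs stack isR l r u).1 := by
  intro cs stack isR l r u h
  match cs with
  | c :: rest =>
    simp only [dfsScan]
    split_ifs <;>
      first
        | exact Nat.lt_succ_self u
        | exact lt_of_lt_of_le (Nat.lt_succ_self u) (dfsScan_ge _ _ _ _ _ _)

def dfsAux (l : List Char) : List Char :=
  if hl : l = [] then [] else
    if (dfsScan l [] true 0 0 0).2 then
      l.take (dfsScan l [] true 0 0 0).1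
        ++ (if h : (dfsScan l [] true 0 0 0).1 < l.length
            then dfsAux (l.drop (dfsScan l [] true 0 0 0).1) else [])
    else
      (['('] ++ (if h : (dfsScan l [] true 0 0 0).1 < l.length
                 then dfsAux (l.drop (dfsScan l [] true 0 0 0).1) else []) ++ [')'])
        ++ (((l.take (dfsScan l [] true 0 0 0).1).drop 1).take
              ((dfsScan l [] true 0 0 0).1 - 1 - 1)).map (fun c => if c = '(' then ')' else '(')
termination_by l.length
decreasing_by
  all_goals
    simp only [List.length_drop]
    have h0 : 0 < (dfsScan l [] true 0 0 0).1 := dfsScan_pos l [] true 0 0 0 hl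
    omega

def dfs (p : String) : String := String.mk (dfsAux p.toList)

-- ===== PORT B =====
-- phase 1 of Source B: split p into minimal zero-balance segments, tagged with their ok flag
def dfsAltSplit : List Char → Int → List Char → Bool → List (List Char × Bool) → List (List Char × Bool)
  | [], _bal, cur, ok, acc => if cur = [] then acc else acc ++ [(cur, ok)]
  | c :: rest, bal, cur, ok, acc =>
    let ok' := if c ≠ '(' ∧ bal = 0 then false else ok
    let bal' := if c = '(' then bal + 1 else bal - 1
    let cur' := cur ++ [c]
    if bal' = 0 then dfsAltSplit rest 0 [] true (acc ++ [(cur', ok')])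
    else dfsAltSplit rest bal' cur' ok' acc

-- phase 2 of Source B: fold over reversed(segs) updating res
def dfsAltFold : List (List Char × Bool) → List Char → List Char
  | [], res => res
  | (seg, good) :: rest, res =>
    dfsAltFold rest
      (if good then seg ++ res
       else ['('] ++ res ++ [')'] ++ ((seg.drop 1).dropLast).map (fun c => if c = '(' then ')' else '('))

def dfs_alt (p : String) : String :=
  String.mk (dfsAltFold (dfsAltSplit p.toList 0 [] true []).reverse [])

-- ===== PRECONDITION & SPEC =====
def Spec_dfs (p : String) (out : String) : Prop := out = dfs_alt p
instance (p : String) (out : String) : Decidable (Spec_dfs p out) := by unfold Spec_dfs; infer_instance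

-- ===== CLAIM (what is proved, stated in full; the proofs are below) =====
def Claim_equal_dfs : Prop := ∀ (p : String), Dom_dfs p → Spec_dfs p (dfs p)

-- ===== LEMMAS AND PROOFS =====

theorem dfsScan_shift : ∀ (cs stack : List Char) (isR : Bool) (l r : Int) (u : Nat),
    dfsScan cs stack isR l r u
      = ((dfsScan cs stack isR l r 0).1 + u, (dfsScan cs stack isR l r 0).2) := by
  intro cs
  induction cs with
  | nil => intro stack isR l r u; simp [dfsScan]
  | cons c rest ih =>
    intro stack isR l r u
    simp only [dfsScan]
    split_ifs
    all_goals try rw [ih _ _ _ _ (u+1), ih _ _ _ _ 1]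
    all_goals (simp [Prod.ext_iff]; try omega)

theorem dfsScan_le : ∀ (cs stack : List Char) (isR : Bool) (l r : Int),
    (dfsScan cs stack isR l r 0).1 ≤ cs.length := by
  intro cs
  induction cs with
  | nil => intro stack isR l r; simp [dfsScan]
  | cons c rest ih =>
    intro stack isR l r
    simp only [dfsScan]
    split_ifs
    all_goals try rw [dfsScan_shift _ _ _ _ _ 1]
    all_goals simp
    all_goals simpa using ih _ _ _ _

theorem dfsAltSplit_append : ∀ (a : List (List Char × Bool)) (cs : List Char) (bal : Int)
    (cur : List Char) (ok : Bool) (b : List (List Char × Bool)),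
    dfsAltSplit cs bal cur ok (a ++ b) = a ++ dfsAltSplit cs bal cur ok b := by
  intro a cs
  induction cs with
  | nil => intro bal cur ok b; simp only [dfsAltSplit]; split_ifs <;> simp
  | cons c rest ih =>
    intro bal cur ok b
    simp only [dfsAltSplit]
    split_ifs
    all_goals first
      | (rw [List.append_assoc]; exact ih _ _ _ _)
      | exact ih _ _ _ _

theorem dfsAltSplit_acc : ∀ (cs : List Char) (bal : Int) (cur : List Char) (ok : Bool)
    (acc : List (List Char × Bool)),
    dfsAltSplit cs bal cur ok acc = acc ++ dfsAltSplit cs bal cur ok [] := by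
  intro cs bal cur ok acc
  simpa using dfsAltSplit_append acc cs bal cur ok []

theorem dfsAltFold_append : ∀ (xs ys : List (List Char × Bool)) (res : List Char),
    dfsAltFold (xs ++ ys) res = dfsAltFold ys (dfsAltFold xs res) := by
  intro xs
  induction xs with
  | nil => intro ys res; simp [dfsAltFold]
  | cons x rest ih =>
    intro ys res
    obtain ⟨seg, good⟩ := x
    simp only [List.cons_append, dfsAltFold]
    rw [ih]

theorem getLast?_all_paren {stack : List Char} (hne : stack ≠ [])
    (hall : ∀ x ∈ stack, x = '(') : stack.getLast? = some '(' := by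
  rw [List.getLast?_eq_some_getLast hne]
  exact congrArg some (hall _ (List.getLast_mem hne))


theorem split_eq_scan : ∀ (cs stack : List Char) (isR : Bool) (l r bal : Int)
    (cur : List Char) (ok : Bool) (acc : List (List Char × Bool)),
    isR = ok →
    (∀ x ∈ stack, x = '(') →
    (0 < bal → stack.length = bal.toNat) →
    (bal = 0 → stack = []) →
    (bal < 0 → isR = false) →
    bal = l - r →
    dfsAltSplit cs bal cur ok acc =
      (if (dfsScan cs stack isR l r 0).1 < cs.length then
        dfsAltSplit (cs.drop (dfsScan cs stack isR l r 0).1) 0 [] true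
          (acc ++ [(cur ++ cs.take (dfsScan cs stack isR l r 0).1, (dfsScan cs stack isR l r 0).2)])
      else if cur ++ cs = [] then acc
      else acc ++ [(cur ++ cs, (dfsScan cs stack isR l r 0).2)]) := by
  intro cs
  induction cs with
  | nil =>
    intro stack isR l r bal cur ok acc hok hall hlen hz hneg hbal
    subst hok
    simp only [dfsScan, dfsAltSplit]
    split_ifs with h1 h2 <;> simp_all
  | cons c rest ih =>
    intro stack isR l r bal cur ok acc hok hall hlen hz hneg hbal
    by_cases hc : c = '('
    · subst hc
      by_cases hb : bal + 1 = 0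
      · -- break on '(' : the segment ends here
        have hlr : l + 1 = r := by omega
        simp only [dfsAltSplit, dfsScan, reduceIte, ne_eq, not_true_eq_false, false_and, if_false,
          if_pos hb, if_pos hlr]
        subst hok
        cases rest <;> simp [dfsAltSplit]
      · have hlr : ¬ (l + 1 = r) := by omega
        simp only [dfsAltSplit, dfsScan, reduceIte, ne_eq, not_true_eq_false, false_and, if_false,
          if_neg hb, if_neg hlr]
        rw [dfsScan_shift rest (stack ++ ['(']) isR (l+1) r 1]
        rw [ih (stack ++ ['(']) isR (l+1) r (bal+1) (cur ++ ['(']) ok acc hok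
              (by intro x hx
                  rcases List.mem_append.1 hx with h | h
                  · exact hall x h
                  · simpa using h)
              (by intro h
                  rcases lt_trichotomy bal 0 with hb' | hb' | hb'
                  · omega
                  · simp [hz hb', hb']
                  · have := hlen hb'; simp [this]; omega)
              (fun h => absurd h hb)
              (fun h => hneg (by omega))
              (by omega)]
        by_cases hk : (dfsScan rest (stack ++ ['(']) isR (l + 1) r 0).1 < rest.length
        · rw [if_pos hk, if_pos (by simpa using Nat.succ_lt_succ hk)]
          simp
        · rw [if_neg hk, if_neg (by simpa using fun h => hk (Nat.lt_of_succ_lt_succ h))]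
          simp
          exact fun h => absurd h hk
    · -- c counts as a closing character
      by_cases hb : bal = 1
      · -- break: the segment ends here
        have hlr : l = r + 1 := by omega
        have hne : stack ≠ [] := by
          intro h
          have := hlen (by omega)
          rw [h] at this
          simp at this
          omega
        have hg : stack.getLast? = some '(' := getLast?_all_paren hne hall
        simp only [dfsAltSplit, dfsScan, if_neg hc, hg, reduceIte, if_pos hlr,
          if_neg (show ¬ (c ≠ '(' ∧ bal = 0) from fun h => by omega),
          if_pos (show bal - 1 = 0 by omega)]
        subst hok
        cases rest <;> simp [dfsAltSplit]
      · have hlr : ¬ (l = r + 1) := by omega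
        have hnz : ¬ (bal - 1 = 0) := by omega
        rcases lt_trichotomy bal 0 with hbv | hbv | hbv
        · -- bal < 0 : both flags are already false
          have hfR : isR = false := hneg hbv
          have hfO : ok = false := hok ▸ hfR
          by_cases hg : stack.getLast? = some '('
          · simp only [dfsAltSplit, dfsScan, if_neg hc, hg, reduceIte, if_neg hlr,
              if_neg (show ¬ (c ≠ '(' ∧ bal = 0) from fun h => by omega), if_neg hnz]
            rw [dfsScan_shift rest stack.dropLast isR l (r+1) 1]
            rw [ih stack.dropLast isR l (r+1) (bal-1) (cur ++ [c]) ok acc hok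
                  (fun x hx => hall x ((List.dropLast_sublist _).mem hx))
                  (fun h => absurd h (by omega))
                  (fun h => absurd h (by omega))
                  (fun _ => hfR) (by omega)]
            by_cases hk : (dfsScan rest stack.dropLast isR l (r+1) 0).1 < rest.length
            · rw [if_pos hk, if_pos (by simpa using Nat.succ_lt_succ hk)]
              simp
            · rw [if_neg hk, if_neg (by simpa using fun h => hk (Nat.lt_of_succ_lt_succ h))]
              simp
              exact fun h => absurd h hk
          · simp only [dfsAltSplit, dfsScan, if_neg hc, if_neg hg, if_neg hlr,
              if_neg (show ¬ (c ≠ '(' ∧ bal = 0) from fun h => by omega), if_neg hnz]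
            rw [dfsScan_shift rest stack false l (r+1) 1]
            rw [ih stack false l (r+1) (bal-1) (cur ++ [c]) ok acc (hfO ▸ rfl)
                  hall
                  (fun h => absurd h (by omega))
                  (fun h => absurd h (by omega))
                  (fun _ => rfl) (by omega)]
            by_cases hk : (dfsScan rest stack false l (r+1) 0).1 < rest.length
            · rw [if_pos hk, if_pos (by simpa using Nat.succ_lt_succ hk)]
              simp
            · rw [if_neg hk, if_neg (by simpa using fun h => hk (Nat.lt_of_succ_lt_succ h))]
              simp
              exact fun h => absurd h hk
        · -- bal = 0 : A's stack is empty and both sides set their flag to false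
          have hse : stack = [] := hz hbv
          have hg : ¬ (stack.getLast? = some '(') := by simp [hse]
          simp only [dfsAltSplit, dfsScan, if_neg hc, if_neg hg, if_neg hlr,
            if_pos (show c ≠ '(' ∧ bal = 0 from ⟨hc, hbv⟩), if_neg hnz]
          rw [dfsScan_shift rest stack false l (r+1) 1]
          rw [ih stack false l (r+1) (bal-1) (cur ++ [c]) false acc rfl
                hall
                (fun h => absurd h (by omega))
                (fun h => absurd h (by omega))
                (fun _ => rfl) (by omega)]
          by_cases hk : (dfsScan rest stack false l (r+1) 0).1 < rest.length
          · rw [if_pos hk, if_pos (by simpa using Nat.succ_lt_succ hk)]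
            simp
          · rw [if_neg hk, if_neg (by simpa using fun h => hk (Nat.lt_of_succ_lt_succ h))]
            simp
            exact fun h => absurd h hk
        · -- bal ≥ 2 : A pops, flags unchanged
          have hne : stack ≠ [] := by
            intro h
            have := hlen hbv
            rw [h] at this
            simp at this
            omega
          have hg : stack.getLast? = some '(' := getLast?_all_paren hne hall
          simp only [dfsAltSplit, dfsScan, if_neg hc, hg, reduceIte, if_neg hlr,
            if_neg (show ¬ (c ≠ '(' ∧ bal = 0) from fun h => by omega), if_neg hnz]
          rw [dfsScan_shift rest stack.dropLast isR l (r+1) 1]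
          rw [ih stack.dropLast isR l (r+1) (bal-1) (cur ++ [c]) ok acc hok
                (fun x hx => hall x ((List.dropLast_sublist _).mem hx))
                (by intro h
                    rw [List.length_dropLast, hlen hbv]
                    omega)
                (fun h => absurd h hnz)
                (fun h => absurd h (by omega)) (by omega)]
          by_cases hk : (dfsScan rest stack.dropLast isR l (r+1) 0).1 < rest.length
          · rw [if_pos hk, if_pos (by simpa using Nat.succ_lt_succ hk)]
            simp
          · rw [if_neg hk, if_neg (by simpa using fun h => hk (Nat.lt_of_succ_lt_succ h))]
            simp
            exact fun h => absurd h hk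

theorem dfsAux_eq_alt : ∀ (n : Nat) (l : List Char), l.length ≤ n →
    dfsAux l = dfsAltFold (dfsAltSplit l 0 [] true []).reverse [] := by
  intro n
  induction n with
  | zero =>
    intro l hl
    have hnil : l = [] := List.eq_nil_of_length_eq_zero (Nat.le_zero.1 hl)
    subst hnil
    simp [dfsAux, dfsAltSplit, dfsAltFold]
  | succ n ih =>
    intro l hl
    by_cases hle : l = []
    · subst hle
      simp [dfsAux, dfsAltSplit, dfsAltFold]
    · have key := split_eq_scan l [] true 0 0 0 [] true [] rfl (by simp)
        (fun h => absurd h (by omega)) (fun _ => rfl) (fun h => absurd h (by omega)) (by omega)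
      have hpos : 0 < (dfsScan l [] true 0 0 0).1 := dfsScan_pos l [] true 0 0 0 hle
      by_cases hu : (dfsScan l [] true 0 0 0).1 < l.length
      · rw [if_pos hu,
           dfsAltSplit_acc (l.drop (dfsScan l [] true 0 0 0).1) 0 [] true] at key
        simp only [List.nil_append] at key
        have hrec := ih (l.drop (dfsScan l [] true 0 0 0).1) (by simp; omega)
        rw [dfsAux]
        rw [dif_neg hle, key]
        simp only [List.nil_append, List.reverse_append, List.reverse_cons, List.reverse_nil,
          List.nil_append]
        rw [dfsAltFold_append, ← hrec]
        cases hsv : (dfsScan l [] true 0 0 0).2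
        · -- unbalanced segment: match the two interior slices
          simp only [dfsAltFold, dif_pos hu, Bool.false_eq_true, if_false]
          have hlen1 : ((l.take (dfsScan l [] true 0 0 0).1).drop 1).length
              = (dfsScan l [] true 0 0 0).1 - 1 := by
            simp [Nat.min_eq_left (Nat.le_of_lt hu)]
          rw [List.dropLast_eq_take, hlen1]
          try simp [List.append_assoc]
        · simp only [dfsAltFold, dif_pos hu, if_true]
          try simp
      · rw [if_neg hu, if_neg (by simp [hle])] at key
        have hufull : (dfsScan l [] true 0 0 0).1 = l.length :=
          Nat.le_antisymm (dfsScan_le l [] true 0 0) (Nat.le_of_not_lt hu)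
        rw [dfsAux]
        rw [dif_neg hle, key]
        simp only [List.nil_append, List.reverse_cons, List.reverse_nil, List.nil_append]
        cases hsv : (dfsScan l [] true 0 0 0).2
        · simp only [dfsAltFold, dif_neg hu, Bool.false_eq_true, if_false]
          have htake : l.take (dfsScan l [] true 0 0 0).1 = l := by
            rw [hufull]; exact List.take_length
          have hlen1 : (l.drop 1).length = l.length - 1 := by simp
          rw [htake, List.dropLast_eq_take, hlen1, hufull]
          try simp [List.append_assoc]
        · simp only [dfsAltFold, dif_neg hu, if_true]
          rw [hufull, List.take_length]
          try simp

-- ===== VERDICT (by name: the statement is the Claim_ definition above) =====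
theorem dfs_spec : Claim_equal_dfs := by
  intro p _
  unfold Spec_dfs dfs dfs_alt
  rw [dfsAux_eq_alt p.toList.length p.toList le_rfl]
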